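-- pv_equiv track=rewrite | github.com/Bobby-Wan/Daily-Coding-Problems | problem35.py | make_rgb
-- ===== SOURCE A (Python) =====
-- def make_rgb(array):
--     counters = dict()
--     counters['R'] = counters['G'] = counters['B'] = 0
--
--     for e in array:
--         counters[e] += 1
--
--     current_indexes = dict()
--     current_indexes['R'] = 0
--     current_indexes['G'] = counters['R']
--     current_indexes['B'] = counters['R'] + counters['G']
--
--     for i in range(counters['R']):
--         while array[i] != 'R':
--             temp = array[i]
--             array[i] = array[current_indexes[temp]]
--             array[current_indexes[temp]] = temp
--             current_indexes[temp] += 1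
--         current_indexes['R'] += 1
--
--     for i in range(current_indexes['G'], counters['R'] + counters['G']):
--         while array[i] != 'G':
--             temp = array[i]
--             array[i] = array[current_indexes[temp]]
--             array[current_indexes[temp]] = temp
--             current_indexes[temp] += 1
--
--     return array
-- ===== SOURCE B (Python) =====
-- def make_rgb(array):
--     # Counting sort: tally the three colours (KeyError on anything else, as before),
--     # then overwrite the list in place with the R-block, G-block and B-block.
--     counters = {'R': 0, 'G': 0, 'B': 0}
--     for e in array:
--         counters[e] += 1
--     array[:] = ['R'] * counters['R'] + ['G'] * counters['G'] + ['B'] * counters['B']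
--     return array
-- ===== Notes on version B (the rewrite author's own statement) =====
-- stated objective: simpler
-- what changed: Replaced the two swap-based partitioning passes with their pointer dict and while-loops by a counting sort: tally the colours once into the counters dict (keeping the KeyError on other strings) and rebuild the list as R-block ++ G-block ++ B-block.
import Mathlib
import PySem

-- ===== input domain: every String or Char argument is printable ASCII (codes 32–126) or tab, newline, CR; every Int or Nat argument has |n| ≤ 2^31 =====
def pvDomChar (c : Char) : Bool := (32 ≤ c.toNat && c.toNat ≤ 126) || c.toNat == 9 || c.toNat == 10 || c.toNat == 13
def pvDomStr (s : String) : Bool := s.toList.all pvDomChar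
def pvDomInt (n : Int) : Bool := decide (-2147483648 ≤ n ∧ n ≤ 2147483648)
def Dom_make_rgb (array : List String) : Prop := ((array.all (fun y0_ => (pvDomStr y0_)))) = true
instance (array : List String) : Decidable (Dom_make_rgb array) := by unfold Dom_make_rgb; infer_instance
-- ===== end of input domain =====

-- B replaces A's two swap-based partitioning passes by a counting sort (count 'R'/'G', rebuild
-- the blocks); both Pythons mutate the argument list in place — the theorem is about the return value.


-- ===== PORT A =====
-- mutable state of A's partitioning loops: the list plus current_indexes['R'/'G'/'B']
structure RgbSt where
  a : List String
  cir : Nat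
  cig : Nat
  cib : Nat
deriving Repr, DecidableEq

-- "for e in array: counters[e] += 1"; none = KeyError on a key not in the dict
def rgbCount (d : PySem.Dict String Int) : List String → Option (PySem.Dict String Int)
  | [] => some d
  | e :: rest =>
    match d.get? e with
    | none => none
    | some v => rgbCount (d.insert e (v + 1)) rest

-- current_indexes[temp]; none = KeyError
def rgbPtr (s : RgbSt) (t : String) : Option Nat :=
  if t = "R" then some s.cir else if t = "G" then some s.cig
  else if t = "B" then some s.cib else none

-- current_indexes[temp] += 1
def rgbIncPtr (s : RgbSt) (t : String) : RgbSt :=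
  if t = "R" then { s with cir := s.cir + 1 } else if t = "G" then { s with cig := s.cig + 1 }
  else { s with cib := s.cib + 1 }

-- "while array[i] != target: temp = array[i]; array[i] = array[ci[temp]]; array[ci[temp]] = temp;
--  ci[temp] += 1" — fuel only makes it total (none = fuel out / IndexError / KeyError)
def rgbWhile (target : String) (i : Nat) : Nat → RgbSt → Option RgbSt
  | 0, _ => none
  | fuel + 1, s =>
    match s.a[i]? with
    | none => none
    | some t =>
      if t = target then some s
      else
        match rgbPtr s t with
        | none => none
        | some p =>
          match s.a[p]? with
          | none => none
          | some v => rgbWhile target i fuel { rgbIncPtr s t with a := (s.a.set i v).set p t }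

-- "for i in range(counters['R']): while …; current_indexes['R'] += 1"
def rgbPhase1 (fuel : Nat) (cR : Nat) (i : Nat) (s : RgbSt) : Option RgbSt :=
  if _h : i < cR then
    match rgbWhile "R" i fuel s with
    | none => none
    | some s' => rgbPhase1 fuel cR (i + 1) { s' with cir := s'.cir + 1 }
  else some s
termination_by cR - i

-- "for i in range(current_indexes['G'], counters['R'] + counters['G']): while …"
def rgbPhase2 (fuel : Nat) (stop : Nat) (i : Nat) (s : RgbSt) : Option RgbSt :=
  if _h : i < stop then
    match rgbWhile "G" i fuel s with
    | none => none
    | some s' => rgbPhase2 fuel stop (i + 1) s'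
  else some s
termination_by stop - i

def make_rgb (array : List String) : List String :=
  let d0 := (((PySem.Dict.empty : PySem.Dict String Int).insert "R" 0).insert "G" 0).insert "B" 0
  match rgbCount d0 array with
  | none => array   -- Python raises KeyError here; excluded by Pre_
  | some d =>
    let cR := (d.getD "R" 0).toNat   -- counts are provably ≥ 0; Nat indices for the loops
    let cG := (d.getD "G" 0).toNat
    let s0 : RgbSt := ⟨array, 0, cR, cR + cG⟩
    match rgbPhase1 (array.length + 1) cR 0 s0 with
    | none => array
    | some s1 =>
      match rgbPhase2 (array.length + 1) (cR + cG) s1.cig s1 with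
      | none => array
      | some s2 => s2.a

-- ===== PORT B =====
-- "for e in array: counters[e] += 1"; none = KeyError on a key not in the dict
def altCounters (d : PySem.Dict String Int) : List String → Option (PySem.Dict String Int)
  | [] => some d
  | e :: rest =>
    match d.get? e with
    | none => none
    | some v => altCounters (d.insert e (v + 1)) rest

def make_rgb_alt (array : List String) : List String :=
  let d0 := (((PySem.Dict.empty : PySem.Dict String Int).insert "R" 0).insert "G" 0).insert "B" 0
  match altCounters d0 array with
  | none => array   -- Python raises KeyError here; excluded by Pre_
  | some d =>
    List.replicate (d.getD "R" 0).toNat "R" ++ List.replicate (d.getD "G" 0).toNat "G"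
      ++ List.replicate (d.getD "B" 0).toNat "B"

-- ===== PRECONDITION & SPEC =====
-- Pre_ excludes exactly the inputs containing a string other than "R"/"G"/"B": there A raises KeyError.
def Pre_make_rgb (array : List String) : Prop := ∀ e ∈ array, e = "R" ∨ e = "G" ∨ e = "B"
instance (array : List String) : Decidable (Pre_make_rgb array) := by unfold Pre_make_rgb; infer_instance

def pvWitness_make_rgb : List String := ["G", "B", "R", "G", "B", "R"]

def Spec_make_rgb (array : List String) (out : List String) : Prop := out = make_rgb_alt array
instance (array : List String) (out : List String) : Decidable (Spec_make_rgb array out) := by unfold Spec_make_rgb; infer_instance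

-- ===== CLAIM (what is proved, stated in full; the proofs are below) =====
def Claim_equal_make_rgb : Prop := ∀ (array : List String), Dom_make_rgb array → Pre_make_rgb array → Spec_make_rgb array (make_rgb array)

-- ===== LEMMAS AND PROOFS =====

-- the counting loop on an all-R/G/B list: adds the counts to the three keys
lemma rgbCount_spec (xs : List String) (d : PySem.Dict String Int) (r g b : Int)
    (hx : ∀ e ∈ xs, e = "R" ∨ e = "G" ∨ e = "B")
    (hr : d.get? "R" = some r) (hg : d.get? "G" = some g) (hb : d.get? "B" = some b) :
    ∃ d', rgbCount d xs = some d' ∧ d'.get? "R" = some (r + xs.count "R")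
      ∧ d'.get? "G" = some (g + xs.count "G") ∧ d'.get? "B" = some (b + xs.count "B") := by
  induction xs generalizing d r g b with
  | nil => exact ⟨d, rfl, by simpa using hr, by simpa using hg, by simpa using hb⟩
  | cons e rest ih =>
    have hrest : ∀ x ∈ rest, x = "R" ∨ x = "G" ∨ x = "B" := fun x hx' => hx x (by simp [hx'])
    rcases hx e (by simp) with he | he | he <;> subst he
    · obtain ⟨d', h1, h2, h3, h4⟩ := ih (d.insert "R" (r + 1)) (r + 1) g b hrest
        (PySem.Dict.get?_insert_self d "R" (r+1))
        (by rw [PySem.Dict.get?_insert_of_ne d (r+1) (by decide)]; exact hg)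
        (by rw [PySem.Dict.get?_insert_of_ne d (r+1) (by decide)]; exact hb)
      refine ⟨d', ?_, ?_, ?_, ?_⟩ <;> simp [rgbCount, hr, h1, h2, h3, h4] <;> ring
    · obtain ⟨d', h1, h2, h3, h4⟩ := ih (d.insert "G" (g + 1)) r (g + 1) b hrest
        (by rw [PySem.Dict.get?_insert_of_ne d (g+1) (by decide)]; exact hr)
        (PySem.Dict.get?_insert_self d "G" (g+1))
        (by rw [PySem.Dict.get?_insert_of_ne d (g+1) (by decide)]; exact hb)
      refine ⟨d', ?_, ?_, ?_, ?_⟩ <;> simp [rgbCount, hg, h1, h2, h3, h4] <;> ring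
    · obtain ⟨d', h1, h2, h3, h4⟩ := ih (d.insert "B" (b + 1)) r g (b + 1) hrest
        (by rw [PySem.Dict.get?_insert_of_ne d (b+1) (by decide)]; exact hr)
        (by rw [PySem.Dict.get?_insert_of_ne d (b+1) (by decide)]; exact hg)
        (PySem.Dict.get?_insert_self d "B" (b+1))
      refine ⟨d', ?_, ?_, ?_, ?_⟩ <;> simp [rgbCount, hb, h1, h2, h3, h4] <;> ring

-- on an all-R/G/B list the three counts exhaust the length
lemma count_sum (l : List String) (h : ∀ e ∈ l, e = "R" ∨ e = "G" ∨ e = "B") :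
    l.count "R" + l.count "G" + l.count "B" = l.length := by
  induction l with
  | nil => simp
  | cons e rest ih =>
    have hrest := ih (fun x hx => h x (by simp [hx]))
    rcases h e (by simp) with he | he | he <;> subst he <;>
      simp [List.count_cons] <;> omega

-- a segment that is pointwise c is a replicate (as take/drop)
lemma seg_replicate (a : List String) (c : String) (lo hi : Nat) (hhi : hi ≤ a.length)
    (h : ∀ j, lo ≤ j → j < hi → a[j]? = some c) :
    (a.drop lo).take (hi - lo) = List.replicate (hi - lo) c := by
  rcases Nat.lt_or_ge hi lo with hlt | hle
  · simp [Nat.sub_eq_zero_of_le (Nat.le_of_lt hlt)]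
  · apply List.ext_getElem
    · simp; omega
    · intro j h1 h2
      have hj : (lo + j) < a.length := by simp at h1; omega
      have := h (lo + j) (by omega) (by simp at h1; omega)
      simp [List.getElem?_eq_getElem hj] at this
      simpa [Nat.add_comm lo j] using this

-- count decomposed around a [lo, hi) window
lemma count_decomp (a : List String) (c : String) (lo hi : Nat) (hle : lo ≤ hi)
    (hhi : hi ≤ a.length) :
    a.count c = (a.take lo).count c + ((a.drop lo).take (hi - lo)).count c + (a.drop hi).count c := by
  have h2 : (a.drop lo).drop (hi - lo) = a.drop hi := by
    rw [List.drop_drop]; congr 1; omega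
  have h1 : a = a.take lo ++ ((a.drop lo).take (hi - lo) ++ a.drop hi) := by
    rw [← h2, List.take_append_drop, List.take_append_drop]
  conv_lhs => rw [h1]
  simp only [List.count_append]; ring

-- …and an extra c strictly outside the window forces count ≥ hi - lo + 1
lemma count_ge_seg_succ (a : List String) (c : String) (lo hi i : Nat) (hle : lo ≤ hi)
    (hhi : hi ≤ a.length) (h : ∀ j, lo ≤ j → j < hi → a[j]? = some c)
    (hi2 : a[i]? = some c) (hout : i < lo ∨ hi ≤ i) :
    hi - lo + 1 ≤ a.count c := by
  have hilen : i < a.length := by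
    by_contra hc
    rw [List.getElem?_eq_none (by omega)] at hi2; cases hi2
  rw [count_decomp a c lo hi hle hhi, seg_replicate a c lo hi hhi h]
  rcases hout with hout | hout
  · have hm : c ∈ a.take lo := by
      have : (a.take lo)[i]? = some c := by
        rw [List.getElem?_take_of_lt hout]; exact hi2
      exact List.mem_of_getElem? this
    have := List.one_le_count_iff.mpr hm
    simp [List.count_replicate]; omega
  · have hm : c ∈ a.drop hi := by
      have : (a.drop hi)[i - hi]? = some c := by
        rw [List.getElem?_drop]; rwa [Nat.add_sub_cancel' hout]
      exact List.mem_of_getElem? this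
    have := List.one_le_count_iff.mpr hm
    simp [List.count_replicate]; omega

-- setting one position changes the count by the obvious ±1 balance
lemma count_set_aux (a : List String) (n : Nat) (x c : String) (h : n < a.length) :
    (a.set n x).count c + (if a[n] = c then 1 else 0) = a.count c + (if x = c then 1 else 0) := by
  have hdec : a = a.take n ++ a[n] :: a.drop (n + 1) := by
    conv_lhs => rw [← List.take_append_drop n a]
    rw [← List.getElem_cons_drop h]
  rw [List.set_eq_take_cons_drop x h]
  conv_rhs => rw [hdec]
  simp only [List.count_append, List.count_cons, beq_iff_eq]
  split_ifs <;> omega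

-- a two-position swap preserves counts
lemma count_swap (a : List String) (i p : Nat) (t v c : String)
    (hi : a[i]? = some t) (hp : a[p]? = some v) :
    ((a.set i v).set p t).count c = a.count c := by
  have hilen : i < a.length := by
    by_contra hc; rw [List.getElem?_eq_none (by omega)] at hi; cases hi
  have hplen : p < a.length := by
    by_contra hc; rw [List.getElem?_eq_none (by omega)] at hp; cases hp
  have hit : a[i] = t := by rw [List.getElem?_eq_getElem hilen] at hi; exact Option.some.inj hi
  have hpv : a[p] = v := by rw [List.getElem?_eq_getElem hplen] at hp; exact Option.some.inj hp
  rcases eq_or_ne i p with rfl | hne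
  · rw [List.set_set]
    have : a.set i t = a := by rw [← hit]; exact List.set_getElem_self hilen
    rw [this]
  · have h1 := count_set_aux a i v c hilen
    have hplen' : p < (a.set i v).length := by simpa using hplen
    have h2 := count_set_aux (a.set i v) p t c hplen'
    have hsp : (a.set i v)[p]'hplen' = a[p] := List.getElem_set_ne hne hplen'
    rw [hsp, hpv] at h2
    rw [hit] at h1
    split_ifs at h1 h2 <;> omega

-- every element is one of the three colour strings
def rgbAll (l : List String) : Prop := ∀ e ∈ l, e = "R" ∨ e = "G" ∨ e = "B"

-- the loop invariant of A's partitioning passes: counts preserved, both pointer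
-- regions [cR, cig) and [cR+cG, cib) already hold their colour
def RgbInv (orig : List String) (s : RgbSt) : Prop :=
  s.a.length = orig.length ∧
  s.a.count "R" = orig.count "R" ∧
  s.a.count "G" = orig.count "G" ∧
  rgbAll s.a ∧
  orig.count "R" ≤ s.cig ∧ s.cig ≤ orig.count "R" + orig.count "G" ∧
  orig.count "R" + orig.count "G" ≤ s.cib ∧ s.cib ≤ orig.length ∧
  (∀ j, orig.count "R" ≤ j → j < s.cig → s.a[j]? = some "G") ∧
  (∀ j, orig.count "R" + orig.count "G" ≤ j → j < s.cib → s.a[j]? = some "B")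

-- the swap's effect on membership
lemma rgbAll_swap (a : List String) (i p : Nat) (t v : String)
    (hall : rgbAll a) (hp : a[p]? = some v) (ht : t = "R" ∨ t = "G" ∨ t = "B") :
    rgbAll ((a.set i v).set p t) := by
  intro e he
  rcases List.mem_or_eq_of_mem_set he with he1 | heq
  · rcases List.mem_or_eq_of_mem_set he1 with he2 | heq
    · exact hall e he2
    · rw [heq]; exact hall _ (List.mem_of_getElem? hp)
  · rw [heq]; exact ht

-- the phase-1 while loop: starting below the R boundary it ends with an 'R' at i, keeping RgbInv
lemma rgbWhile1_ok (orig : List String) : ∀ (fuel : Nat) (s : RgbSt) (i : Nat),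
    RgbInv orig s → (∀ j, j < i → s.a[j]? = some "R") → i < orig.count "R" →
    (orig.count "R" + orig.count "G" - s.cig) + (orig.length - s.cib) < fuel →
    ∃ s', rgbWhile "R" i fuel s = some s' ∧ RgbInv orig s' ∧
      (∀ j, j < i → s'.a[j]? = some "R") ∧ s'.a[i]? = some "R" := by
  intro fuel
  induction fuel with
  | zero => intro s i _ _ _ hf; omega
  | succ f ih =>
    intro s i hInv hpre hi hf
    obtain ⟨hlen, hcR, hcG, hall, h1, h2, h3, h4, hGreg, hBreg⟩ := hInv
    have hilen : i < s.a.length := by omega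
    have hgeti : s.a[i]? = some (s.a[i]'hilen) := List.getElem?_eq_getElem hilen
    rcases hall _ (List.mem_of_getElem? hgeti) with ht | ht | ht
    · -- a[i] = "R": the while exits at once
      refine ⟨s, ?_, ⟨hlen, hcR, hcG, hall, h1, h2, h3, h4, hGreg, hBreg⟩, hpre, by rw [hgeti, ht]⟩
      simp [rgbWhile, hgeti, ht]
    · -- a[i] = "G": swap it to position cig
      have hgeti' : s.a[i]? = some "G" := by rw [hgeti, ht]
      have hcig : s.cig < orig.count "R" + orig.count "G" := by
        have := count_ge_seg_succ s.a "G" (orig.count "R") s.cig i h1 (by omega) hGreg hgeti'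
          (Or.inl (by omega))
        omega
      have hplen : s.cig < s.a.length := by omega
      have hgetp : s.a[s.cig]? = some (s.a[s.cig]'hplen) := List.getElem?_eq_getElem hplen
      set v := s.a[s.cig]'hplen with hv
      set s₂ : RgbSt := ⟨(s.a.set i v).set s.cig "G", s.cir, s.cig + 1, s.cib⟩ with hs₂
      have hlen₂ : s₂.a.length = orig.length := by simp [hs₂]; omega
      have hInv₂ : RgbInv orig s₂ := by
        refine ⟨hlen₂, ?_, ?_, rgbAll_swap _ _ _ _ _ hall hgetp (by tauto), by simp [hs₂]; omega,
          by simp [hs₂]; omega, by simp [hs₂]; omega, by simp [hs₂]; omega, ?_, ?_⟩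
        · rw [hs₂]; rw [count_swap s.a i s.cig "G" v "R" hgeti' hgetp]; exact hcR
        · rw [hs₂]; rw [count_swap s.a i s.cig "G" v "G" hgeti' hgetp]; exact hcG
        · intro j hj1 hj2
          simp only [hs₂] at hj2 ⊢
          rcases eq_or_ne j s.cig with rfl | hne
          · exact List.getElem?_set_self (by simpa using hplen)
          · rw [List.getElem?_set_ne (Ne.symm hne), List.getElem?_set_ne (by omega)]
            exact hGreg j hj1 (by omega)
        · intro j hj1 hj2
          simp only [hs₂] at hj2 ⊢
          rw [List.getElem?_set_ne (by omega), List.getElem?_set_ne (by omega)]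
          exact hBreg j hj1 (by omega)
      have hpre₂ : ∀ j, j < i → s₂.a[j]? = some "R" := by
        intro j hj
        simp only [hs₂]
        rw [List.getElem?_set_ne (by omega), List.getElem?_set_ne (by omega)]
        exact hpre j hj
      obtain ⟨s', he, hI, hp', hr'⟩ := ih s₂ i hInv₂ hpre₂ hi (by simp [hs₂]; omega)
      refine ⟨s', ?_, hI, hp', hr'⟩
      rw [show (rgbWhile "R" i (f + 1) s) = rgbWhile "R" i f s₂ from ?_]
      · exact he
      · simp [rgbWhile, hgeti', rgbPtr, rgbIncPtr, hgetp, hs₂]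
    · -- a[i] = "B": swap it to position cib
      have hgeti' : s.a[i]? = some "B" := by rw [hgeti, ht]
      have hsum := count_sum s.a hall
      have hcB : s.a.count "B" = orig.length - (orig.count "R" + orig.count "G") := by omega
      have hcib : s.cib < orig.length := by
        have := count_ge_seg_succ s.a "B" (orig.count "R" + orig.count "G") s.cib i h3
          (by omega) hBreg hgeti' (Or.inl (by omega))
        omega
      have hplen : s.cib < s.a.length := by omega
      have hgetp : s.a[s.cib]? = some (s.a[s.cib]'hplen) := List.getElem?_eq_getElem hplen
      set v := s.a[s.cib]'hplen with hv
      set s₂ : RgbSt := ⟨(s.a.set i v).set s.cib "B", s.cir, s.cig, s.cib + 1⟩ with hs₂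
      have hlen₂ : s₂.a.length = orig.length := by simp [hs₂]; omega
      have hInv₂ : RgbInv orig s₂ := by
        refine ⟨hlen₂, ?_, ?_, rgbAll_swap _ _ _ _ _ hall hgetp (by tauto), by simp [hs₂]; omega,
          by simp [hs₂]; omega, by simp [hs₂]; omega, by simp [hs₂]; omega, ?_, ?_⟩
        · rw [hs₂]; rw [count_swap s.a i s.cib "B" v "R" hgeti' hgetp]; exact hcR
        · rw [hs₂]; rw [count_swap s.a i s.cib "B" v "G" hgeti' hgetp]; exact hcG
        · intro j hj1 hj2
          simp only [hs₂] at hj2 ⊢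
          rw [List.getElem?_set_ne (by omega), List.getElem?_set_ne (by omega)]
          exact hGreg j hj1 (by omega)
        · intro j hj1 hj2
          simp only [hs₂] at hj2 ⊢
          rcases eq_or_ne j s.cib with rfl | hne
          · exact List.getElem?_set_self (by simpa using hplen)
          · rw [List.getElem?_set_ne (Ne.symm hne), List.getElem?_set_ne (by omega)]
            exact hBreg j hj1 (by omega)
      have hpre₂ : ∀ j, j < i → s₂.a[j]? = some "R" := by
        intro j hj
        simp only [hs₂]
        rw [List.getElem?_set_ne (by omega), List.getElem?_set_ne (by omega)]
        exact hpre j hj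
      obtain ⟨s', he, hI, hp', hr'⟩ := ih s₂ i hInv₂ hpre₂ hi (by simp [hs₂]; omega)
      refine ⟨s', ?_, hI, hp', hr'⟩
      rw [show (rgbWhile "R" i (f + 1) s) = rgbWhile "R" i f s₂ from ?_]
      · exact he
      · simp [rgbWhile, hgeti', rgbPtr, rgbIncPtr, hgetp, hs₂]

-- the phase-2 while loop: it ends with a 'G' at i, keeping RgbInv, the R prefix and the G run
lemma rgbWhile2_ok (orig : List String) : ∀ (fuel : Nat) (s : RgbSt) (i : Nat),
    RgbInv orig s → (∀ j, j < orig.count "R" → s.a[j]? = some "R") →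
    (∀ j, orig.count "R" ≤ j → j < i → s.a[j]? = some "G") →
    s.cig ≤ i → orig.count "R" ≤ i → i < orig.count "R" + orig.count "G" →
    orig.length - s.cib < fuel →
    ∃ s', rgbWhile "G" i fuel s = some s' ∧ RgbInv orig s' ∧ s'.cig = s.cig ∧
      (∀ j, j < orig.count "R" → s'.a[j]? = some "R") ∧
      (∀ j, orig.count "R" ≤ j → j < i → s'.a[j]? = some "G") ∧ s'.a[i]? = some "G" := by
  intro fuel
  induction fuel with
  | zero => intro s i _ _ _ _ _ _ hf; omega
  | succ f ih =>
    intro s i hInv hpreR hrun hcigi hri hlt hf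
    obtain ⟨hlen, hcR, hcG, hall, h1, h2, h3, h4, hGreg, hBreg⟩ := hInv
    have hilen : i < s.a.length := by omega
    have hgeti : s.a[i]? = some (s.a[i]'hilen) := List.getElem?_eq_getElem hilen
    rcases hall _ (List.mem_of_getElem? hgeti) with ht | ht | ht
    · -- a[i] = "R" is impossible: all cR many "R"s already sit in the prefix
      exfalso
      have hgeti' : s.a[i]? = some "R" := by rw [hgeti, ht]
      have := count_ge_seg_succ s.a "R" 0 (orig.count "R") i (by omega) (by omega)
        (fun j _ hj => hpreR j hj) hgeti' (Or.inr (by omega))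
      omega
    · -- a[i] = "G": the while exits at once
      refine ⟨s, ?_, ⟨hlen, hcR, hcG, hall, h1, h2, h3, h4, hGreg, hBreg⟩, rfl, hpreR, hrun,
        by rw [hgeti, ht]⟩
      simp [rgbWhile, hgeti, ht]
    · -- a[i] = "B": swap it to position cib
      have hgeti' : s.a[i]? = some "B" := by rw [hgeti, ht]
      have hcib : s.cib < orig.length := by
        have := count_ge_seg_succ s.a "B" (orig.count "R" + orig.count "G") s.cib i h3
          (by omega) hBreg hgeti' (Or.inl (by omega))
        have hsum := count_sum s.a hall
        omega
      have hplen : s.cib < s.a.length := by omega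
      have hgetp : s.a[s.cib]? = some (s.a[s.cib]'hplen) := List.getElem?_eq_getElem hplen
      set v := s.a[s.cib]'hplen with hv
      set s₂ : RgbSt := ⟨(s.a.set i v).set s.cib "B", s.cir, s.cig, s.cib + 1⟩ with hs₂
      have hlen₂ : s₂.a.length = orig.length := by simp [hs₂]; omega
      have hInv₂ : RgbInv orig s₂ := by
        refine ⟨hlen₂, ?_, ?_, rgbAll_swap _ _ _ _ _ hall hgetp (by tauto), by simp [hs₂]; omega,
          by simp [hs₂]; omega, by simp [hs₂]; omega, by simp [hs₂]; omega, ?_, ?_⟩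
        · rw [hs₂]; rw [count_swap s.a i s.cib "B" v "R" hgeti' hgetp]; exact hcR
        · rw [hs₂]; rw [count_swap s.a i s.cib "B" v "G" hgeti' hgetp]; exact hcG
        · intro j hj1 hj2
          simp only [hs₂] at hj2 ⊢
          rw [List.getElem?_set_ne (by omega), List.getElem?_set_ne (by omega)]
          exact hGreg j hj1 (by omega)
        · intro j hj1 hj2
          simp only [hs₂] at hj2 ⊢
          rcases eq_or_ne j s.cib with rfl | hne
          · exact List.getElem?_set_self (by simpa using hplen)
          · rw [List.getElem?_set_ne (Ne.symm hne), List.getElem?_set_ne (by omega)]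
            exact hBreg j hj1 (by omega)
      have hpreR₂ : ∀ j, j < orig.count "R" → s₂.a[j]? = some "R" := by
        intro j hj
        simp only [hs₂]
        rw [List.getElem?_set_ne (by omega), List.getElem?_set_ne (by omega)]
        exact hpreR j hj
      have hrun₂ : ∀ j, orig.count "R" ≤ j → j < i → s₂.a[j]? = some "G" := by
        intro j hj1 hj2
        simp only [hs₂]
        rw [List.getElem?_set_ne (by omega), List.getElem?_set_ne (by omega)]
        exact hrun j hj1 hj2
      obtain ⟨s', he, hI, hcg', hp', hr', hg'⟩ := ih s₂ i hInv₂ hpreR₂ hrun₂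
        (by simp [hs₂]; omega) hri hlt (by simp [hs₂]; omega)
      refine ⟨s', ?_, hI, by simp [hcg', hs₂], hp', hr', hg'⟩
      rw [show (rgbWhile "G" i (f + 1) s) = rgbWhile "G" i f s₂ from ?_]
      · exact he
      · simp [rgbWhile, hgeti', rgbPtr, rgbIncPtr, hgetp, hs₂]

-- RgbInv ignores current_indexes['R']
lemma RgbInv_cir (orig : List String) (s : RgbSt) (m : Nat) (h : RgbInv orig s) :
    RgbInv orig { s with cir := m } := h

-- phase 1 establishes the R prefix
lemma rgbPhase1_ok (orig : List String) : ∀ (k i : Nat) (s : RgbSt),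
    RgbInv orig s → (∀ j, j < i → s.a[j]? = some "R") → i ≤ orig.count "R" →
    orig.count "R" - i ≤ k →
    ∃ s', rgbPhase1 (orig.length + 1) (orig.count "R") i s = some s' ∧ RgbInv orig s' ∧
      (∀ j, j < orig.count "R" → s'.a[j]? = some "R") := by
  intro k
  induction k with
  | zero =>
    intro i s hInv hpre hile hk
    have hieq : i = orig.count "R" := by omega
    refine ⟨s, ?_, hInv, by rw [← hieq]; exact hpre⟩
    rw [rgbPhase1]; simp [hieq]
  | succ k ih =>
    intro i s hInv hpre hile hk
    rcases Nat.lt_or_ge i (orig.count "R") with hlt | hge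
    · have hfuel : (orig.count "R" + orig.count "G" - s.cig) + (orig.length - s.cib)
          < orig.length + 1 := by
        obtain ⟨hlen, hcR, hcG, hall, h1, h2, h3, h4, _, _⟩ := hInv
        omega
      obtain ⟨s', he, hI, hp', hr'⟩ := rgbWhile1_ok orig (orig.length + 1) s i hInv hpre hlt hfuel
      have hp'' : ∀ j, j < i + 1 → ({ s' with cir := s'.cir + 1 } : RgbSt).a[j]? = some "R" := by
        intro j hj
        rcases Nat.lt_or_ge j i with hji | hji
        · exact hp' j hji
        · have : j = i := by omega
          rw [this]; exact hr'
      obtain ⟨s'', he2, hI2, hp2⟩ := ih (i + 1) { s' with cir := s'.cir + 1 }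
        (RgbInv_cir orig s' _ hI) hp'' (by omega) (by omega)
      refine ⟨s'', ?_, hI2, hp2⟩
      rw [rgbPhase1]; simp only [hlt, dif_pos, he]
      exact he2
    · have hieq : i = orig.count "R" := by omega
      refine ⟨s, ?_, hInv, by rw [← hieq]; exact hpre⟩
      rw [rgbPhase1]; simp [hieq]

-- phase 2 establishes the G run
lemma rgbPhase2_ok (orig : List String) : ∀ (k i : Nat) (s : RgbSt),
    RgbInv orig s → (∀ j, j < orig.count "R" → s.a[j]? = some "R") →
    (∀ j, orig.count "R" ≤ j → j < i → s.a[j]? = some "G") →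
    s.cig ≤ i → orig.count "R" ≤ i → i ≤ orig.count "R" + orig.count "G" →
    orig.count "R" + orig.count "G" - i ≤ k →
    ∃ s', rgbPhase2 (orig.length + 1) (orig.count "R" + orig.count "G") i s = some s' ∧
      RgbInv orig s' ∧ (∀ j, j < orig.count "R" → s'.a[j]? = some "R") ∧
      (∀ j, orig.count "R" ≤ j → j < orig.count "R" + orig.count "G" → s'.a[j]? = some "G") := by
  intro k
  induction k with
  | zero =>
    intro i s hInv hpreR hrun hcigi hri hile hk
    have hieq : i = orig.count "R" + orig.count "G" := by omega
    refine ⟨s, ?_, hInv, hpreR, by rw [← hieq]; exact hrun⟩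
    rw [rgbPhase2]; simp [hieq]
  | succ k ih =>
    intro i s hInv hpreR hrun hcigi hri hile hk
    rcases Nat.lt_or_ge i (orig.count "R" + orig.count "G") with hlt | hge
    · have hfuel : orig.length - s.cib < orig.length + 1 := by omega
      obtain ⟨s', he, hI, hcg', hp', hr', hg'⟩ :=
        rgbWhile2_ok orig (orig.length + 1) s i hInv hpreR hrun hcigi hri hlt hfuel
      have hrun' : ∀ j, orig.count "R" ≤ j → j < i + 1 → s'.a[j]? = some "G" := by
        intro j hj1 hj2
        rcases Nat.lt_or_ge j i with hji | hji
        · exact hr' j hj1 hji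
        · have : j = i := by omega
          rw [this]; exact hg'
      obtain ⟨s'', he2, hI2, hp2, hg2⟩ := ih (i + 1) s' hI hp' hrun'
        (by omega) (by omega) (by omega) (by omega)
      refine ⟨s'', ?_, hI2, hp2, hg2⟩
      rw [rgbPhase2]; simp only [hlt, dif_pos, he]
      exact he2
    · have hieq : i = orig.count "R" + orig.count "G" := by omega
      refine ⟨s, ?_, hInv, hpreR, by rw [← hieq]; exact hrun⟩
      rw [rgbPhase2]; simp [hieq]

-- a list with the right counts, an R prefix and a G run is the canonical R/G/B blocks
lemma final_shape (orig l : List String)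
    (hlen : l.length = orig.length) (hcR : l.count "R" = orig.count "R")
    (hcG : l.count "G" = orig.count "G") (hall : rgbAll l)
    (hpre : ∀ j, j < orig.count "R" → l[j]? = some "R")
    (hrun : ∀ j, orig.count "R" ≤ j → j < orig.count "R" + orig.count "G" → l[j]? = some "G") :
    l = List.replicate (orig.count "R") "R" ++ List.replicate (orig.count "G") "G" ++
      List.replicate (orig.length - orig.count "R" - orig.count "G") "B" := by
  have hsum := count_sum l hall
  have hB : ∀ j, orig.count "R" + orig.count "G" ≤ j → j < orig.length → l[j]? = some "B" := by
    intro j hj1 hj2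
    have hjlen : j < l.length := by omega
    have hget : l[j]? = some (l[j]'hjlen) := List.getElem?_eq_getElem hjlen
    rcases hall _ (List.mem_of_getElem? hget) with ht | ht | ht
    · exfalso
      have := count_ge_seg_succ l "R" 0 (orig.count "R") j (by omega) (by omega)
        (fun j' _ hj' => hpre j' hj') (by rw [hget, ht]) (Or.inr (by omega))
      omega
    · exfalso
      have := count_ge_seg_succ l "G" (orig.count "R") (orig.count "R" + orig.count "G") j
        (by omega) (by omega) hrun (by rw [hget, ht]) (Or.inr (by omega))
      omega
    · rw [hget, ht]
  have e1 : l.take (orig.count "R") = List.replicate (orig.count "R") "R" := by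
    have := seg_replicate l "R" 0 (orig.count "R") (by omega) (fun j _ hj => hpre j hj)
    simpa using this
  have e2 : (l.drop (orig.count "R")).take (orig.count "G")
      = List.replicate (orig.count "G") "G" := by
    have := seg_replicate l "G" (orig.count "R") (orig.count "R" + orig.count "G")
      (by omega) hrun
    simpa using this
  have e3 : l.drop (orig.count "R" + orig.count "G")
      = List.replicate (orig.length - orig.count "R" - orig.count "G") "B" := by
    have h4 := seg_replicate l "B" (orig.count "R" + orig.count "G") orig.length
      (by omega) hB
    have hlen4 : (l.drop (orig.count "R" + orig.count "G")).length
        = orig.length - (orig.count "R" + orig.count "G") := by simp; omega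
    have h5 : (l.drop (orig.count "R" + orig.count "G")).take
        (orig.length - (orig.count "R" + orig.count "G"))
        = l.drop (orig.count "R" + orig.count "G") :=
      List.take_of_length_le (by simp; omega)
    rw [h5] at h4
    rw [h4]; congr 1; omega
  conv_lhs => rw [← List.take_append_drop (orig.count "R") l,
    ← List.take_append_drop (orig.count "G") (l.drop (orig.count "R"))]
  rw [e1, e2, List.drop_drop, List.append_assoc]
  congr 2

-- the two counting loops are the same transliteration of "counters[e] += 1"
lemma altCounters_eq_rgbCount (xs : List String) : ∀ d, altCounters d xs = rgbCount d xs := by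
  induction xs with
  | nil => intro d; rfl
  | cons e rest ih =>
    intro d
    simp only [altCounters, rgbCount]
    cases d.get? e with
    | none => rfl
    | some v => exact ih _

-- ===== VERDICT (by name: the statement is the Claim_ definition above) =====
theorem make_rgb_spec : Claim_equal_make_rgb := by
  intro array _hdom hpre
  unfold Spec_make_rgb
  have hall : rgbAll array := hpre
  have hsum := count_sum array hall
  obtain ⟨d', hc, hR', hG', hB'⟩ := rgbCount_spec array
    ((((PySem.Dict.empty : PySem.Dict String Int).insert "R" 0).insert "G" 0).insert "B" 0)
    0 0 0 hall rfl rfl rfl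
  have hgR : (d'.getD "R" 0).toNat = array.count "R" := by
    unfold PySem.Dict.getD; rw [hR']; simp
  have hgG : (d'.getD "G" 0).toNat = array.count "G" := by
    unfold PySem.Dict.getD; rw [hG']; simp
  have hgB : (d'.getD "B" 0).toNat = array.length - array.count "R" - array.count "G" := by
    unfold PySem.Dict.getD; rw [hB']; simp; omega
  have hc2 : altCounters
      ((((PySem.Dict.empty : PySem.Dict String Int).insert "R" 0).insert "G" 0).insert "B" 0)
      array = some d' := by rw [altCounters_eq_rgbCount]; exact hc
  have hInv0 : RgbInv array ⟨array, 0, array.count "R", array.count "R" + array.count "G"⟩ := by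
    refine ⟨rfl, rfl, rfl, hall, ?_, ?_, ?_, ?_, ?_, ?_⟩
    · exact le_refl _
    · dsimp only; omega
    · exact le_refl _
    · dsimp only; omega
    · intro j hj1 hj2; dsimp only at hj2; exact absurd hj2 (by omega)
    · intro j hj1 hj2; dsimp only at hj1 hj2; exact absurd hj2 (by omega)
  obtain ⟨s1, he1, hI1, hp1⟩ := rgbPhase1_ok array (array.count "R") 0
    ⟨array, 0, array.count "R", array.count "R" + array.count "G"⟩ hInv0
    (fun j hj => absurd hj (Nat.not_lt_zero j)) (by omega) (by omega)
  have hI1c := hI1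
  obtain ⟨hlen1, hcR1, hcG1, hall1, hg1, hg2, hg3, hg4, hGreg1, _⟩ := hI1c
  obtain ⟨s2, he2, hI2, hp2, hg2'⟩ := rgbPhase2_ok array
    (array.count "R" + array.count "G") s1.cig s1 hI1 hp1
    (fun j hj1 hj2 => hGreg1 j hj1 hj2) (le_refl _) hg1 hg2 (by omega)
  obtain ⟨hlen2, hcR2, hcG2, hall2, _, _, _, _, _, _⟩ := hI2
  have hfinal := final_shape array s2.a hlen2 hcR2 hcG2 hall2 hp2 hg2'
  show make_rgb array = make_rgb_alt array
  unfold make_rgb make_rgb_alt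
  simp only [hc, hc2, hgR, hgG, hgB, he1, he2]
  exact hfinal
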